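-- pv_equiv track=rewrite | github.com/AliceNN-ucdenver/ncms | src/ncms/application/adapters/sdg/v9/generator.py | _build_slots_from_entities
-- ===== SOURCE A (Python) =====
-- def _build_slots_from_entities(
--     entities: dict[tuple[str, str], str],
-- ) -> dict[str, str]:
--     """Flatten ``{(role, slot): surface}`` to ``{slot: surface}``.
--
--     Keeps the PRIMARY-role surface when multiple roles touch the same
--     slot (e.g. ``choice_medication_switch`` has both primary and
--     alternative medications — slots["medication"] gets the primary).
--     Alternative surfaces land in the ``alternative`` slot by
--     convention so downstream consumers can read them out.
--     """
--     out: dict[str, str] = {}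
--     # First pass: primary wins the slot.
--     for (role, slot_key), surface in entities.items():
--         base_slot = slot_key.split("#", 1)[0]
--         if role == "primary":
--             out[base_slot] = surface
--     # Second pass: alternatives fill "alternative" if not already set.
--     for (role, _slot_key), surface in entities.items():
--         if role == "alternative" and "alternative" not in out:
--             out["alternative"] = surface
--     # Third pass: casual slots fill in only if primary didn't already.
--     for (role, slot_key), surface in entities.items():
--         base_slot = slot_key.split("#", 1)[0]
--         if role == "casual" and base_slot not in out:
--             out[base_slot] = surface
--     return out
-- ===== SOURCE B (Python) =====
-- def _build_slots_from_entities(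
--     entities: dict[tuple[str, str], str],
-- ) -> dict[str, str]:
--     """One pass over entities builds three tables, then one combine step."""
--     primary_map: dict[str, str] = {}
--     casual_map: dict[str, str] = {}
--     first_alt: str | None = None
--     for (role, slot_key), surface in entities.items():
--         base_slot = slot_key.split("#", 1)[0]
--         if role == "primary":
--             primary_map[base_slot] = surface          # last wins
--         elif role == "casual":
--             casual_map.setdefault(base_slot, surface)  # first wins
--         elif role == "alternative" and first_alt is None:
--             first_alt = surface                        # first alternative
--     out = dict(primary_map)
--     if first_alt is not None and "alternative" not in out:
--         out["alternative"] = first_alt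
--     for base_slot, surface in casual_map.items():
--         out.setdefault(base_slot, surface)
--     return out
-- ===== Notes on version B (the rewrite author's own statement) =====
-- stated objective: alternative
-- what changed: Replaces A's three full passes over entities (each re-probing the growing output dict) by a single accumulating pass building primary/casual tables and the first alternative surface, followed by a combine step over the small tables only.
import Mathlib
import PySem

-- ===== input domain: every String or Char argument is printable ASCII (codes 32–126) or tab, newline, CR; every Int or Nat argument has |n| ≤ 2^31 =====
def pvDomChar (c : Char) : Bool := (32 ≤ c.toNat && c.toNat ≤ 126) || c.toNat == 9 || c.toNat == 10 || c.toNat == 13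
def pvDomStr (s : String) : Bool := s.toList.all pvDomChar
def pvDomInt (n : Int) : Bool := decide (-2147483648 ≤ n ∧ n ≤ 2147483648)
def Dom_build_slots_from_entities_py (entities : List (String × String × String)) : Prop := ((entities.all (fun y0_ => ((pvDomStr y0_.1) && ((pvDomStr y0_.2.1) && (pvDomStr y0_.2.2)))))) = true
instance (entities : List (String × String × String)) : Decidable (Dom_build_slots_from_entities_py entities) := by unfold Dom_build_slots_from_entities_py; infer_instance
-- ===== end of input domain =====

-- B replaces A's three full passes over the entity list by a single accumulating pass plus a
-- combine step over the small accumulated tables (objective: alternative decomposition).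

-- slot_key.split("#", 1)[0]; sep "#" ≠ "" so splitMax? is some, and split always yields a
-- nonempty list, so the defaults are unreachable (exact).
def pvBase (slot : String) : String :=
  (((PySem.Str.splitMax? slot "#" 1).getD []).headD "")

-- ===== PORT A =====
def build_slots_from_entities_py (entities : List (String × String × String)) : List (String × String) :=
  -- entities is a dict {(role, slot): surface} → assoc list (role, slot, surface)
  let out1 := entities.foldl (fun out e =>
    if e.1 == "primary" then out.insert (pvBase e.2.1) e.2.2 else out) PySem.Dict.empty
  let out2 := entities.foldl (fun out e =>
    if e.1 == "alternative" && !out.contains "alternative" then out.insert "alternative" e.2.2 else out) out1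
  let out3 := entities.foldl (fun out e =>
    if e.1 == "casual" && !out.contains (pvBase e.2.1) then out.insert (pvBase e.2.1) e.2.2 else out) out2
  out3.items

-- ===== PORT B =====
def build_slots_from_entities_py_alt (entities : List (String × String × String)) : List (String × String) :=
  let st := entities.foldl
    (fun (st : PySem.Dict String String × PySem.Dict String String × Option String) e =>
      let base := pvBase e.2.1
      if e.1 == "primary" then (st.1.insert base e.2.2, st.2.1, st.2.2)
      else if e.1 == "casual" then (st.1, st.2.1.setdefault base e.2.2, st.2.2)
      else if e.1 == "alternative" && st.2.2.isNone then (st.1, st.2.1, some e.2.2)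
      else st)
    (PySem.Dict.empty, PySem.Dict.empty, none)
  let out0 := st.1
  let out1 := match st.2.2 with
    | some s => if !out0.contains "alternative" then out0.insert "alternative" s else out0
    | none => out0
  let out2 := st.2.1.items.foldl (fun out p => out.setdefault p.1 p.2) out1
  out2.items

-- ===== PRECONDITION & SPEC =====
def Spec_build_slots_from_entities_py (entities : List (String × String × String)) (out : List (String × String)) : Prop := out = build_slots_from_entities_py_alt entities
instance (entities : List (String × String × String)) (out : List (String × String)) : Decidable (Spec_build_slots_from_entities_py entities out) := by unfold Spec_build_slots_from_entities_py; infer_instance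

-- ===== CLAIM (what is proved, stated in full; the proofs are below) =====
def Claim_equal_build_slots_from_entities_py : Prop := ∀ (entities : List (String × String × String)), Dom_build_slots_from_entities_py entities → Spec_build_slots_from_entities_py entities (build_slots_from_entities_py entities)

-- ===== LEMMAS AND PROOFS =====

-- Abbreviations for the loops appearing in the two ports, with their one-step unfoldings.
def pvSD (d : PySem.Dict String String) (ps : List (String × String)) : PySem.Dict String String :=
  ps.foldl (fun d p => d.setdefault p.1 p.2) d

def pvP (d : PySem.Dict String String) (l : List (String × String × String)) : PySem.Dict String String :=
  l.foldl (fun out e => if e.1 == "primary" then out.insert (pvBase e.2.1) e.2.2 else out) d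

def pvC (d : PySem.Dict String String) (l : List (String × String × String)) : PySem.Dict String String :=
  l.foldl (fun out e => if e.1 == "casual" then out.setdefault (pvBase e.2.1) e.2.2 else out) d

def pvA2 (d : PySem.Dict String String) (l : List (String × String × String)) : PySem.Dict String String :=
  l.foldl (fun out e => if e.1 == "alternative" && !out.contains "alternative" then out.insert "alternative" e.2.2 else out) d

def pvP3 (d : PySem.Dict String String) (l : List (String × String × String)) : PySem.Dict String String :=
  l.foldl (fun out e => if e.1 == "casual" && !out.contains (pvBase e.2.1) then out.insert (pvBase e.2.1) e.2.2 else out) d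

def pvAlt (o : Option String) (l : List (String × String × String)) : Option String :=
  l.foldl (fun o e => if e.1 == "alternative" && o.isNone then some e.2.2 else o) o

theorem pvSD_cons (d : PySem.Dict String String) (p : String × String) (t : List (String × String)) :
    pvSD d (p :: t) = pvSD (d.setdefault p.1 p.2) t := rfl

theorem pvA2_cons (d : PySem.Dict String String) (e : String × String × String) (t : List (String × String × String)) :
    pvA2 d (e :: t) = pvA2 (if e.1 == "alternative" && !d.contains "alternative" then d.insert "alternative" e.2.2 else d) t := rfl

theorem pvAlt_cons (o : Option String) (e : String × String × String) (t : List (String × String × String)) :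
    pvAlt o (e :: t) = pvAlt (if e.1 == "alternative" && o.isNone then some e.2.2 else o) t := rfl

theorem pvAlt_some (l : List (String × String × String)) (s : String) : pvAlt (some s) l = some s := by
  induction l with
  | nil => rfl
  | cons e t ih => rw [pvAlt_cons, show (if e.1 == "alternative" && (some s).isNone then some e.2.2 else some s) = some s by simp]; exact ih

theorem pvSD_contains_mono (ps : List (String × String)) (d : PySem.Dict String String) (k : String)
    (h : d.contains k = true) : (pvSD d ps).contains k = true := by
  induction ps generalizing d with
  | nil => exact h
  | cons p t ih =>
      rw [pvSD_cons]
      exact ih _ (by simp [PySem.Dict.contains_setdefault, h])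

theorem pvSD_contains_of_mem (ps : List (String × String)) (d : PySem.Dict String String)
    (p : String × String) (h : p ∈ ps) : (pvSD d ps).contains p.1 = true := by
  induction ps generalizing d with
  | nil => cases h
  | cons q t ih =>
      rw [pvSD_cons]
      rcases List.mem_cons.mp h with rfl | h
      · exact pvSD_contains_mono t _ _ (by simp [PySem.Dict.contains_setdefault])
      · exact ih _ h

theorem pvSD_contains_of_contains (m : PySem.Dict String String) (acc : PySem.Dict String String)
    (k : String) (hc : m.contains k = true) : (pvSD acc m.items).contains k = true := by
  have hm : k ∈ m.keys := (PySem.Dict.contains_iff_mem_keys m k).mp hc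
  simp only [PySem.Dict.keys, List.mem_map] at hm
  obtain ⟨q, hq, hq1⟩ := hm
  simpa [hq1] using pvSD_contains_of_mem m.items acc q hq

-- One setdefault step commutes with collecting into a first-wins dict.
theorem pvSD_step (m acc : PySem.Dict String String) (k v : String) :
    (pvSD acc m.items).setdefault k v = pvSD acc (m.setdefault k v).items := by
  by_cases hc : m.contains k = true
  · rw [PySem.Dict.setdefault_of_contains m v hc,
        PySem.Dict.setdefault_of_contains _ v (pvSD_contains_of_contains m acc k hc)]
  · rw [PySem.Dict.setdefault_of_not_contains m v (by simpa using hc),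
        PySem.Dict.items_insert_of_not_contains m v (by simpa using hc)]
    simp [pvSD, List.foldl_append]

-- A's third-pass step is a setdefault.
theorem pvP3_eq_pvC (l : List (String × String × String)) (d : PySem.Dict String String) :
    pvP3 d l = pvC d l := by
  induction l generalizing d with
  | nil => rfl
  | cons e t ih =>
      show pvP3 (if e.1 == "casual" && !d.contains (pvBase e.2.1) then d.insert (pvBase e.2.1) e.2.2 else d) t
         = pvC (if e.1 == "casual" then d.setdefault (pvBase e.2.1) e.2.2 else d) t
      have hstep : (if e.1 == "casual" && !d.contains (pvBase e.2.1) then d.insert (pvBase e.2.1) e.2.2 else d)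
          = (if e.1 == "casual" then d.setdefault (pvBase e.2.1) e.2.2 else d) := by
        by_cases hr : (e.1 == "casual") = true
        · by_cases hc : d.contains (pvBase e.2.1) = true
          · simp [hr, hc, PySem.Dict.setdefault_of_contains d _ hc]
          · simp [hr, hc, PySem.Dict.setdefault_of_not_contains d _ (by simpa using hc)]
        · simp [hr]
      rw [hstep]; exact ih _

-- pvC factors through the casual map.
theorem pvC_factor (l : List (String × String × String)) (m acc : PySem.Dict String String) :
    pvC (pvSD acc m.items) l = pvSD acc (pvC m l).items := by
  induction l generalizing m with
  | nil => rfl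
  | cons e t ih =>
      show pvC (if e.1 == "casual" then (pvSD acc m.items).setdefault (pvBase e.2.1) e.2.2 else pvSD acc m.items) t
         = pvSD acc (pvC (if e.1 == "casual" then m.setdefault (pvBase e.2.1) e.2.2 else m) t).items
      by_cases hr : (e.1 == "casual") = true
      · rw [if_pos hr, if_pos hr, pvSD_step]
        exact ih _
      · rw [if_neg (by simp [hr]), if_neg (by simp [hr])]
        exact ih m

-- A's second pass is stable once "alternative" is set.
theorem pvA2_stable (l : List (String × String × String)) (d : PySem.Dict String String)
    (h : d.contains "alternative" = true) : pvA2 d l = d := by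
  induction l generalizing d with
  | nil => rfl
  | cons e t ih =>
      rw [pvA2_cons,
          show (if e.1 == "alternative" && !d.contains "alternative" then d.insert "alternative" e.2.2 else d) = d by simp [h]]
      exact ih d h

-- A's second pass equals B's combine with the first alternative surface.
theorem pvA2_eq_combine (l : List (String × String × String)) (d : PySem.Dict String String) :
    pvA2 d l = (match pvAlt none l with
      | some s => if !d.contains "alternative" then d.insert "alternative" s else d
      | none => d) := by
  induction l generalizing d with
  | nil => rfl
  | cons e t ih =>
      by_cases hr : (e.1 == "alternative") = true
      · by_cases hc : d.contains "alternative" = true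
        · rw [pvA2_cons,
              show (if e.1 == "alternative" && !d.contains "alternative" then d.insert "alternative" e.2.2 else d) = d by simp [hc],
              ih d]
          cases pvAlt none t <;> cases pvAlt none (e :: t) <;> simp [hc]
        · rw [pvA2_cons,
              show (if e.1 == "alternative" && !d.contains "alternative" then d.insert "alternative" e.2.2 else d)
                 = d.insert "alternative" e.2.2 by simp [hr, hc],
              pvA2_stable t _ (PySem.Dict.contains_insert_self d _ _),
              pvAlt_cons,
              show (if e.1 == "alternative" && (none : Option String).isNone then some e.2.2 else none) = some e.2.2 by simp [hr],
              pvAlt_some t e.2.2]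
          simp [hc]
      · rw [pvA2_cons,
            show (if e.1 == "alternative" && !d.contains "alternative" then d.insert "alternative" e.2.2 else d) = d by simp [hr],
            pvAlt_cons,
            show (if e.1 == "alternative" && (none : Option String).isNone then some e.2.2 else none) = none by simp [hr]]
        exact ih d

-- B's single pass computes the three independent folds componentwise.
theorem pvTriple (l : List (String × String × String))
    (pm cm : PySem.Dict String String) (fa : Option String) :
    l.foldl
      (fun (st : PySem.Dict String String × PySem.Dict String String × Option String) e =>
        let base := pvBase e.2.1
        if e.1 == "primary" then (st.1.insert base e.2.2, st.2.1, st.2.2)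
        else if e.1 == "casual" then (st.1, st.2.1.setdefault base e.2.2, st.2.2)
        else if e.1 == "alternative" && st.2.2.isNone then (st.1, st.2.1, some e.2.2)
        else st)
      (pm, cm, fa)
    = (pvP pm l, pvC cm l, pvAlt fa l) := by
  induction l generalizing pm cm fa with
  | nil => rfl
  | cons e t ih =>
      rw [List.foldl_cons]
      by_cases h1 : (e.1 == "primary") = true
      · have h2 : (e.1 == "casual") = false := by
          rw [beq_iff_eq.mp h1]; decide
        have h3 : (e.1 == "alternative") = false := by
          rw [beq_iff_eq.mp h1]; decide
        simp only [h1, h2, h3, if_true, Bool.false_eq_true, Bool.false_and, if_false]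
        rw [ih]
        show _ = (pvP pm (e :: t), pvC cm (e :: t), pvAlt fa (e :: t))
        simp [pvP, pvC, pvAlt, beq_iff_eq.mp h1]
      · by_cases h2 : (e.1 == "casual") = true
        · have h3 : (e.1 == "alternative") = false := by
            rw [beq_iff_eq.mp h2]; decide
          simp only [h1, h2, h3, Bool.false_eq_true, if_false, if_true, Bool.false_and]
          rw [ih]
          show _ = (pvP pm (e :: t), pvC cm (e :: t), pvAlt fa (e :: t))
          simp [pvP, pvC, pvAlt, beq_iff_eq.mp h2]
        · by_cases h3 : (e.1 == "alternative" && fa.isNone) = true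
          · obtain ⟨h3a, h3b⟩ := Bool.and_eq_true_iff.mp h3
            have ha : e.1 = "alternative" := beq_iff_eq.mp h3a
            have hfa : fa = none := Option.isNone_iff_eq_none.mp h3b
            simp only [h1, h2, h3, Bool.false_eq_true, if_false, if_true]
            rw [ih]
            show _ = (pvP pm (e :: t), pvC cm (e :: t), pvAlt fa (e :: t))
            simp [pvP, pvC, pvAlt, ha, hfa]
          · have hp : ¬ e.1 = "primary" := by simpa using h1
            have hc : ¬ e.1 = "casual" := by simpa using h2
            have ha : ¬ (e.1 = "alternative" ∧ fa = none) := by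
              rintro ⟨x, y⟩
              exact h3 (by simp [x, y])
            simp only [h1, h2, h3, Bool.false_eq_true, if_false]
            rw [ih]
            show _ = (pvP pm (e :: t), pvC cm (e :: t), pvAlt fa (e :: t))
            simp [pvP, pvC, pvAlt, hp, hc, ha]

-- ===== VERDICT (by name: the statement is the Claim_ definition above) =====
theorem build_slots_from_entities_py_spec : Claim_equal_build_slots_from_entities_py := by
  intro entities _
  unfold Spec_build_slots_from_entities_py build_slots_from_entities_py build_slots_from_entities_py_alt
  rw [pvTriple]
  show (pvP3 (pvA2 (pvP PySem.Dict.empty entities) entities) entities).items = _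
  have hmain : ∀ d : PySem.Dict String String,
      pvP3 d entities = pvSD d (pvC PySem.Dict.empty entities).items := by
    intro d
    rw [pvP3_eq_pvC]
    exact pvC_factor entities PySem.Dict.empty d
  rw [hmain, pvA2_eq_combine]
  cases h : pvAlt none entities with
  | none => rfl
  | some s => rfl
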